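-- pv_equiv track=rewrite | github.com/alexisechano/Artificial-Intelligence-1 | csp/sudoku_part_1_Echano_A.py | check_is_valid
-- ===== SOURCE A (Python) =====
-- def find_thing(c, thing):   #finds number in whatever constrsint c (r or c or b)
--     for t in c:
--         if(thing in t):
--             return t
--     return []
--
-- def check_thru_box(csp, thing, a):
--     box = find_thing(csp, thing)
--     s = []
--     for b in box:
--         if(b in a and a[b] not in s):
--             s.append(a[b])
--         elif(b in a and a[b] in s):
--             return False
--     return True
--
-- def check_is_valid(a, csp, csp2, csp3):  #check if color is not equal to any of the neighbors
--     for adj in a.keys():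
--         if(not check_thru_box(csp2, adj, a)):
--             return False
--         if(not check_thru_box(csp, adj, a)):
--             return False
--         if (not check_thru_box(csp3, adj, a)):
--             return False
--
--     return True
-- ===== SOURCE B (Python) =====
-- def _first_group_index(groups):
--     # map each cell to the index of the FIRST group containing it (one pass)
--     idx = {}
--     i = 0
--     for g in groups:
--         for cell in g:
--             if cell not in idx:
--                 idx[cell] = i
--         i += 1
--     return idx
--
-- def _group_has_dup(g, a):
--     vals = [a[b] for b in g if b in a]
--     return len(set(vals)) != len(vals)
--
-- def check_is_valid(a, csp, csp2, csp3):
--     for groups in (csp, csp2, csp3):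
--         idx = _first_group_index(groups)
--         seen = set()
--         for k in a:
--             i = idx.get(k)
--             if i is not None:
--                 seen.add(i)
--         for i in seen:
--             if _group_has_dup(groups[i], a):
--                 return False
--     return True
-- ===== Notes on version B (the rewrite author's own statement) =====
-- stated objective: faster
-- what changed: A scans every constraint list from the top for every assigned cell (find_thing) and rechecks the same group's values with a list-membership inner loop; B builds a cell-to-first-group index in one pass per constraint list, collects the set of reached groups, and checks each reached group once for duplicate assigned values via len(set(vals)) != len(vals).
import Mathlib
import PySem

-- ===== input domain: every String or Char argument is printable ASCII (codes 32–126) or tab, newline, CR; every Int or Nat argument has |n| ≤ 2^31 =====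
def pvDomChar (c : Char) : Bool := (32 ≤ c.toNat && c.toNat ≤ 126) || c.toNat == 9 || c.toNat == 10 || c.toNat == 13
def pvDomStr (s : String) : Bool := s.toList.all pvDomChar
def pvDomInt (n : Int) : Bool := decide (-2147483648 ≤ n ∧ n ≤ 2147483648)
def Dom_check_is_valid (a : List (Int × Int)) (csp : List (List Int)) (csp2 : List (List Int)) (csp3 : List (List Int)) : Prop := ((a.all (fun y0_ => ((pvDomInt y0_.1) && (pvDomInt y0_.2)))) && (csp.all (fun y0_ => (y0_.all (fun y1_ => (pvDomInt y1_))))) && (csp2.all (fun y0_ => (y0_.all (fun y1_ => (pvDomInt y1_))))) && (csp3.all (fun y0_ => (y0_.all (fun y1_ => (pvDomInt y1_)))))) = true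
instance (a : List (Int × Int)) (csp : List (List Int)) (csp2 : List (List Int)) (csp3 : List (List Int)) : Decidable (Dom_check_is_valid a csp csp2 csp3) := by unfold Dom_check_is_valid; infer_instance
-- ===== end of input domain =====

-- B replaces A's per-key rescans of every constraint list by a one-pass cell→first-group index
-- and a single duplicate check per reached group (objective: faster, asymptotically).

-- ===== PORT A =====
-- for t in c: if thing in t: return t;  return []
def find_thing (c : List (List Int)) (thing : Int) : List Int :=
  match c with
  | [] => []
  | t :: ts => if thing ∈ t then t else find_thing ts thing

-- the loop of check_thru_box: s is the list of values seen so far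
def ctbLoop (a : PySem.Dict Int Int) (box : List Int) (s : List Int) : Bool :=
  match box with
  | [] => true
  | b :: bs =>
    match a.get? b with            -- 'b in a' / 'a[b]'
    | some v => if v ∉ s then ctbLoop a bs (s ++ [v]) else false
    | none => ctbLoop a bs s

def check_thru_box (csp : List (List Int)) (thing : Int) (a : PySem.Dict Int Int) : Bool :=
  ctbLoop a (find_thing csp thing) []

-- the loop of check_is_valid over a.keys()
def civLoop (csp csp2 csp3 : List (List Int)) (a : PySem.Dict Int Int) (ks : List Int) : Bool :=
  match ks with
  | [] => true
  | k :: rest =>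
    if !check_thru_box csp2 k a then false
    else if !check_thru_box csp k a then false
    else if !check_thru_box csp3 k a then false
    else civLoop csp csp2 csp3 a rest

def check_is_valid (a : List (Int × Int)) (csp : List (List Int)) (csp2 : List (List Int)) (csp3 : List (List Int)) : Bool :=
  let d := PySem.Dict.ofList a
  civLoop csp csp2 csp3 d d.keys

-- ===== PORT B =====
-- _first_group_index: one pass over the groups with a running counter i
def fgiInner (i : Int) (idx : PySem.Dict Int Int) (g : List Int) : PySem.Dict Int Int :=
  g.foldl (fun d c => if d.contains c then d else d.insert c i) idx

def fgiAux (groups : List (List Int)) (i : Int) (idx : PySem.Dict Int Int) : PySem.Dict Int Int :=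
  match groups with
  | [] => idx
  | g :: gs => fgiAux gs (i + 1) (fgiInner i idx g)

def firstGroupIndex (groups : List (List Int)) : PySem.Dict Int Int :=
  fgiAux groups 0 PySem.Dict.empty

-- _group_has_dup: vals = [a[b] for b in g if b in a]; len(set(vals)) != len(vals)
def groupHasDup (g : List Int) (d : PySem.Dict Int Int) : Bool :=
  let vals := (g.filter (fun b => d.contains b)).map (fun b => d.getD b 0)
  decide ((PySem.Set.ofList vals).length ≠ vals.length)

-- one iteration of B's outer loop: one constraint list
def checkOne (groups : List (List Int)) (d : PySem.Dict Int Int) : Bool :=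
  let idx := firstGroupIndex groups
  let seen : PySem.Set Int := d.keys.foldl (fun s k =>
      match idx.get? k with
      | some i => PySem.Set.add s i
      | none => s) PySem.Set.empty
  seen.all (fun i => ! groupHasDup (PySem.List.pyGetD groups i []) d)

def check_is_valid_alt (a : List (Int × Int)) (csp : List (List Int)) (csp2 : List (List Int)) (csp3 : List (List Int)) : Bool :=
  let d := PySem.Dict.ofList a
  checkOne csp d && checkOne csp2 d && checkOne csp3 d

-- ===== PRECONDITION & SPEC =====
def Spec_check_is_valid (a : List (Int × Int)) (csp : List (List Int)) (csp2 : List (List Int)) (csp3 : List (List Int)) (out : Bool) : Prop := out = check_is_valid_alt a csp csp2 csp3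
instance (a : List (Int × Int)) (csp : List (List Int)) (csp2 : List (List Int)) (csp3 : List (List Int)) (out : Bool) : Decidable (Spec_check_is_valid a csp csp2 csp3 out) := by unfold Spec_check_is_valid; infer_instance

-- ===== CLAIM (what is proved, stated in full; the proofs are below) =====
def Claim_equal_check_is_valid : Prop := ∀ (a : List (Int × Int)) (csp : List (List Int)) (csp2 : List (List Int)) (csp3 : List (List Int)), Dom_check_is_valid a csp csp2 csp3 → Spec_check_is_valid a csp csp2 csp3 (check_is_valid a csp csp2 csp3)

-- ===== LEMMAS AND PROOFS =====

-- the assigned values of the cells of g, in order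
def valsOf (d : PySem.Dict Int Int) (g : List Int) : List Int :=
  (g.filter (fun b => d.contains b)).map (fun b => d.getD b 0)

-- index of the first group containing k
def firstIdx (k : Int) (groups : List (List Int)) : Option Nat :=
  match groups with
  | [] => none
  | g :: gs => if k ∈ g then some 0 else (firstIdx k gs).map (· + 1)

lemma ctbLoop_eq (d : PySem.Dict Int Int) (box : List Int) :
    ∀ s : List Int, s.Nodup → ctbLoop d box s = decide (s ++ valsOf d box).Nodup := by
  induction box with
  | nil => intro s hs; simp [ctbLoop, valsOf, hs]
  | cons b bs ih =>
    intro s hs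
    rcases h : d.get? b with _ | v
    · have hc : d.contains b = false := by
        rw [PySem.Dict.contains_eq_isSome_get?, h]; rfl
      simp only [ctbLoop, h]
      rw [ih s hs]
      simp [valsOf, hc]
    · have hc : d.contains b = true := by
        rw [PySem.Dict.contains_eq_isSome_get?, h]; rfl
      have hg : d.getD b 0 = v := by simp [PySem.Dict.getD_eq_get?_getD, h]
      simp only [ctbLoop, h]
      have hv : valsOf d (b :: bs) = v :: valsOf d bs := by
        simp [valsOf, hc, hg]
      by_cases hm : v ∈ s
      · simp only [hm, not_true_eq_false]
        rw [hv]
        have : ¬ (s ++ v :: valsOf d bs).Nodup := by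
          intro hn
          rw [List.nodup_append] at hn
          exact (hn.2.2 v hm v List.mem_cons_self) rfl
        simp [this]
      · simp only [hm, not_false_eq_true, if_pos]
        rw [ih (s ++ [v]) (by simp [List.nodup_append, hs]; exact fun a ha he => hm (he ▸ ha))]
        rw [hv]
        have : s ++ v :: valsOf d bs = (s ++ [v]) ++ valsOf d bs := by simp
        rw [this]

lemma fgiInner_get? (i : Int) (g : List Int) :
    ∀ idx : PySem.Dict Int Int, ∀ k,
    (fgiInner i idx g).get? k =
      match idx.get? k with
      | some j => some j
      | none => if k ∈ g then some i else none := by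
  induction g with
  | nil => intro idx k; simp [fgiInner]; cases idx.get? k <;> rfl
  | cons c cs ih =>
    intro idx k
    have step : fgiInner i idx (c :: cs)
        = fgiInner i (if idx.contains c then idx else idx.insert c i) cs := by
      simp [fgiInner]
    rw [step]
    by_cases hc : idx.contains c = true
    · rw [if_pos hc, ih]
      rcases hk : idx.get? k with _ | j
      · simp only
        by_cases hkc : k = c
        · subst hkc
          rw [PySem.Dict.contains_eq_isSome_get?, hk] at hc; simp at hc
        · simp [List.mem_cons, hkc]
      · rfl
    · rw [if_neg hc, ih]
      by_cases hkc : k = c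
      · subst hkc
        have hkn : idx.get? k = none := by
          rw [PySem.Dict.contains_eq_isSome_get?] at hc
          cases h : idx.get? k <;> simp [h] at hc ⊢
        rw [PySem.Dict.get?_insert_self, hkn]
        simp
      · rw [PySem.Dict.get?_insert_of_ne idx i hkc]
        rcases hk : idx.get? k with _ | j
        · simp [List.mem_cons, hkc]
        · rfl

lemma fgiAux_get? (groups : List (List Int)) :
    ∀ (i0 : Int) (idx : PySem.Dict Int Int) (k : Int),
    (fgiAux groups i0 idx).get? k =
      match idx.get? k with
      | some j => some j
      | none => (firstIdx k groups).map (fun n => i0 + (n : Int)) := by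
  induction groups with
  | nil => intro i0 idx k; simp [fgiAux, firstIdx]; cases idx.get? k <;> rfl
  | cons g gs ih =>
    intro i0 idx k
    simp only [fgiAux]
    rw [ih, fgiInner_get?]
    rcases hk : idx.get? k with _ | j
    · simp only
      by_cases hm : k ∈ g
      · simp [firstIdx, hm]
      · simp only [hm, firstIdx, if_false]
        cases hfi : firstIdx k gs with
        | none => simp
        | some n => simp; ring
    · rfl

lemma firstGroupIndex_get? (groups : List (List Int)) (k : Int) :
    (firstGroupIndex groups).get? k = (firstIdx k groups).map (fun n => (n : Int)) := by
  rw [firstGroupIndex, fgiAux_get?]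
  simp [PySem.Dict.get?_empty]

lemma find_thing_eq (groups : List (List Int)) (k : Int) :
    find_thing groups k = (firstIdx k groups).elim [] (fun n => groups.getD n []) := by
  induction groups with
  | nil => rfl
  | cons g gs ih =>
    by_cases hm : k ∈ g
    · simp [find_thing, firstIdx, hm]
    · simp only [find_thing, firstIdx, hm, if_false]
      rw [ih]
      cases firstIdx k gs <;> simp

lemma ofList_length_eq_iff (xs : List Int) :
    (PySem.Set.ofList xs).length = xs.length ↔ xs.Nodup := by
  constructor
  · intro h
    have hsub : (PySem.Set.ofList xs).Sublist xs := by
      clear h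
      induction xs with
      | nil => simp [PySem.Set.ofList_nil]
      | cons x t ih =>
        rw [PySem.Set.ofList_cons]
        refine List.Sublist.cons₂ x ?_
        have hd : PySem.Set.discard (PySem.Set.ofList t) x
            = (PySem.Set.ofList t).filter (fun y => y != x) := rfl
        rw [hd]
        exact ((PySem.Set.ofList t).filter_sublist).trans ih
    have := hsub.eq_of_length h
    rw [← this]
    exact PySem.Set.nodup_ofList xs
  · intro h
    rw [PySem.Set.ofList_eq_self_of_nodup xs h]

lemma mem_seenFold (idx : PySem.Dict Int Int) (ks : List Int) :
    ∀ (s : PySem.Set Int) (x : Int),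
    (x ∈ ks.foldl (fun s k => match idx.get? k with
        | some i => PySem.Set.add s i
        | none => s) s) ↔ x ∈ s ∨ ∃ k ∈ ks, idx.get? k = some x := by
  induction ks with
  | nil => intro s x; simp
  | cons k ks ih =>
    intro s x
    simp only [List.foldl_cons]
    rcases hk : idx.get? k with _ | i
    · rw [ih]
      constructor
      · rintro (h | ⟨k', hk', h⟩)
        · exact Or.inl h
        · exact Or.inr ⟨k', List.mem_cons_of_mem _ hk', h⟩
      · rintro (h | ⟨k', hk', h⟩)
        · exact Or.inl h
        · rcases List.mem_cons.mp hk' with rfl | hk''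
          · rw [hk] at h; cases h
          · exact Or.inr ⟨k', hk'', h⟩
    · rw [ih, PySem.Set.mem_add]
      constructor
      · rintro ((h | rfl) | ⟨k', hk', h⟩)
        · exact Or.inl h
        · exact Or.inr ⟨k, List.mem_cons_self, hk⟩
        · exact Or.inr ⟨k', List.mem_cons_of_mem _ hk', h⟩
      · rintro (h | ⟨k', hk', h⟩)
        · exact Or.inl (Or.inl h)
        · rcases List.mem_cons.mp hk' with rfl | hk''
          · rw [hk] at h; cases h; exact Or.inl (Or.inr rfl)
          · exact Or.inr ⟨k', hk'', h⟩

lemma groupHasDup_eq (g : List Int) (d : PySem.Dict Int Int) :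
    groupHasDup g d = !decide (valsOf d g).Nodup := by
  rw [groupHasDup]
  simp only [valsOf, decide_not]
  congr 1
  exact decide_eq_decide.mpr (ofList_length_eq_iff _)

lemma check_thru_box_iff (csp : List (List Int)) (k : Int) (d : PySem.Dict Int Int) :
    check_thru_box csp k d = true ↔ (valsOf d (find_thing csp k)).Nodup := by
  rw [check_thru_box, ctbLoop_eq d _ [] List.nodup_nil]
  simp

lemma checkOne_iff (groups : List (List Int)) (d : PySem.Dict Int Int) :
    checkOne groups d = true ↔
      ∀ k ∈ d.keys, (valsOf d (find_thing groups k)).Nodup := by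
  rw [checkOne]
  simp only [List.all_eq_true]
  constructor
  · intro h k hk
    rw [find_thing_eq]
    cases hfi : firstIdx k groups with
    | none => simp [valsOf]
    | some n =>
      have hmem : (n : Int) ∈ d.keys.foldl (fun s k =>
          match (firstGroupIndex groups).get? k with
          | some i => PySem.Set.add s i
          | none => s) PySem.Set.empty := by
        rw [mem_seenFold]
        exact Or.inr ⟨k, hk, by rw [firstGroupIndex_get?, hfi]; rfl⟩
      have := h _ hmem
      rw [groupHasDup_eq] at this
      simp only [Bool.not_not, decide_eq_true_eq] at this
      rw [PySem.List.pyGetD_natCast] at this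
      simpa using this
  · intro h x hx
    rw [mem_seenFold] at hx
    rcases hx with hx | ⟨k, hk, hget⟩
    · cases hx
    · rw [firstGroupIndex_get?] at hget
      cases hfi : firstIdx k groups with
      | none => rw [hfi] at hget; cases hget
      | some n =>
        rw [hfi] at hget
        cases hget
        have := h k hk
        rw [find_thing_eq, hfi] at this
        rw [groupHasDup_eq, PySem.List.pyGetD_natCast]
        simpa using this

lemma civLoop_eq (csp csp2 csp3 : List (List Int)) (d : PySem.Dict Int Int) (ks : List Int) :
    civLoop csp csp2 csp3 d ks = ks.all (fun k =>
      check_thru_box csp2 k d && check_thru_box csp k d && check_thru_box csp3 k d) := by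
  induction ks with
  | nil => rfl
  | cons k ks ih =>
    rw [civLoop, ih]
    cases h2 : check_thru_box csp2 k d <;> cases h1 : check_thru_box csp k d <;>
      cases h3 : check_thru_box csp3 k d <;> simp [List.all_cons, h1, h2, h3]

lemma civLoop_iff (csp csp2 csp3 : List (List Int)) (d : PySem.Dict Int Int) (ks : List Int) :
    civLoop csp csp2 csp3 d ks = true ↔
      ∀ k ∈ ks, (valsOf d (find_thing csp k)).Nodup ∧
        (valsOf d (find_thing csp2 k)).Nodup ∧ (valsOf d (find_thing csp3 k)).Nodup := by
  rw [civLoop_eq]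
  simp only [List.all_eq_true, Bool.and_eq_true, check_thru_box_iff]
  constructor
  · intro h k hk; exact ⟨((h k hk).1).2, ((h k hk).1).1, (h k hk).2⟩
  · intro h k hk; exact ⟨⟨(h k hk).2.1, (h k hk).1⟩, (h k hk).2.2⟩

-- ===== VERDICT (by name: the statement is the Claim_ definition above) =====
theorem check_is_valid_spec : Claim_equal_check_is_valid := by
  intro a csp csp2 csp3 _
  unfold Spec_check_is_valid check_is_valid check_is_valid_alt
  set d := PySem.Dict.ofList a with hd
  rw [Bool.eq_iff_iff]
  simp only [Bool.and_eq_true, civLoop_iff, checkOne_iff]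
  constructor
  · intro h
    exact ⟨⟨fun k hk => (h k hk).1, fun k hk => (h k hk).2.1⟩, fun k hk => (h k hk).2.2⟩
  · intro ⟨⟨h1, h2⟩, h3⟩ k hk; exact ⟨h1 k hk, h2 k hk, h3 k hk⟩
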